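-- pv_equiv track=rewrite | github.com/cs-cshi/ts-pcie-log | ltssm_state_jump.py | split_eye_height_by_lane
-- ===== SOURCE A (Python) =====
-- def split_eye_height_by_lane(eye_height_list):
--     lanes_value = {}
--     for item in eye_height_list:
--         lane, value = item.split(":")
--         lane.strip()
--         value.strip()
--         if lane in lanes_value:
--             lanes_value[lane].append(value)
--         else:
--             lanes_value[lane] = [value]
--
--     return list(lanes_value.values())
-- ===== SOURCE B (Python) =====
-- def split_eye_height_by_lane(eye_height_list):
--     # Two-pass nested-scan version: collect distinct lanes in first-seen
--     # order, then gather each lane's values by rescanning the input.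
--     lanes = []
--     for item in eye_height_list:
--         lane, value = item.split(":")
--         if lane not in lanes:
--             lanes.append(lane)
--     result = []
--     for k in lanes:
--         values = []
--         for item in eye_height_list:
--             lane, value = item.split(":")
--             if lane == k:
--                 values.append(value)
--         result.append(values)
--     return result
-- ===== Notes on version B (the rewrite author's own statement) =====
-- stated objective: alternative
-- what changed: Replaces the single hashed pass that builds a dict of lanes to value lists with two plain passes: one collecting distinct lane keys in first-seen order, then a rescan of the input per lane gathering its values.
import Mathlib
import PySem

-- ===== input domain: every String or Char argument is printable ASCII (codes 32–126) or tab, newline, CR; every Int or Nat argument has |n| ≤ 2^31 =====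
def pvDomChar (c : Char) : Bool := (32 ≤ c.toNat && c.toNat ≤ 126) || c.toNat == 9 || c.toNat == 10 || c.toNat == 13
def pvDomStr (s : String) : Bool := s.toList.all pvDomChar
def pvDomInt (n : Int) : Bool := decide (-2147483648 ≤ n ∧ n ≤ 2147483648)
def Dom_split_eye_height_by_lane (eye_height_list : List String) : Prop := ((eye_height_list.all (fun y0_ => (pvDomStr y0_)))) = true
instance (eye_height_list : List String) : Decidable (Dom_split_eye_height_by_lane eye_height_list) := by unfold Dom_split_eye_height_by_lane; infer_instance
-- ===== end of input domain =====

-- B groups by rescanning the input per distinct lane (two plain passes) instead of A's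
-- dict-of-lists built in one hashed pass; return values are identical on Pre_.

-- 'lane, value = item.split(":")': some (lane, value) iff the split has exactly two parts,
-- none where Python's unpacking raises ValueError (those inputs are outside Pre_).
def pySplitLV (item : String) : Option (String × String) :=
  match PySem.Str.split? item ":" with
  | some [lane, value] => some (lane, value)
  | _ => none

-- ===== PORT A =====
-- A's loop body: dict-of-lists, append if the lane is present, else start a fresh list
def stepA (d : PySem.Dict String (List String)) (item : String) : PySem.Dict String (List String) :=
  match pySplitLV item with
  | some (lane, value) =>
      if d.contains lane then d.insert lane (d.getD lane [] ++ [value])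
      else d.insert lane [value]
  | none => d   -- ValueError in Python; outside Pre_

def split_eye_height_by_lane (eye_height_list : List String) : List (List String) :=
  (eye_height_list.foldl stepA PySem.Dict.empty).values

-- ===== PORT B =====
-- B's first pass: distinct lanes in first-seen order
def stepLanes (ls : List String) (item : String) : List String :=
  match pySplitLV item with
  | some (lane, _) => if lane ∈ ls then ls else ls ++ [lane]
  | none => ls   -- ValueError in Python; outside Pre_

-- B's second pass, per lane k: gather the values whose lane matches k
def stepGather (k : String) (vs : List String) (item : String) : List String :=
  match pySplitLV item with
  | some (lane, value) => if lane == k then vs ++ [value] else vs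
  | none => vs

def split_eye_height_by_lane_alt (eye_height_list : List String) : List (List String) :=
  let lanes := eye_height_list.foldl stepLanes []
  lanes.map (fun k => eye_height_list.foldl (stepGather k) [])

-- ===== PRECONDITION & SPEC =====
-- Pre_ excludes exactly the inputs where an item does not contain exactly one ':',
-- on which Python's tuple unpacking raises ValueError (in A and in B alike).
def Pre_split_eye_height_by_lane (eye_height_list : List String) : Prop :=
  ∀ s ∈ eye_height_list, PySem.Str.count s ":" = 1
instance (eye_height_list : List String) : Decidable (Pre_split_eye_height_by_lane eye_height_list) := by unfold Pre_split_eye_height_by_lane; infer_instance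

def pvWitness_split_eye_height_by_lane : List String := ["lane0:1", "lane1:2", "lane0: 3"]

def Spec_split_eye_height_by_lane (eye_height_list : List String) (out : List (List String)) : Prop := out = split_eye_height_by_lane_alt eye_height_list
instance (eye_height_list : List String) (out : List (List String)) : Decidable (Spec_split_eye_height_by_lane eye_height_list out) := by unfold Spec_split_eye_height_by_lane; infer_instance

-- ===== CLAIM (what is proved, stated in full; the proofs are below) =====
def Claim_equal_split_eye_height_by_lane : Prop := ∀ (eye_height_list : List String), Dom_split_eye_height_by_lane eye_height_list → Pre_split_eye_height_by_lane eye_height_list → Spec_split_eye_height_by_lane eye_height_list (split_eye_height_by_lane eye_height_list)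

-- ===== LEMMAS AND PROOFS =====

-- A's two branches are exactly one Dict.modify
theorem stepA_eq_modify (d : PySem.Dict String (List String)) (lane value : String) :
    (if d.contains lane then d.insert lane (d.getD lane [] ++ [value])
     else d.insert lane [value])
    = d.modify lane [] (fun l => l ++ [value]) := by
  by_cases h : d.contains lane = true
  · simp [h, PySem.Dict.modify]
  · simp only [Bool.not_eq_true] at h
    simp [h, PySem.Dict.modify, PySem.Dict.getD_of_not_contains d [] h]

-- A's loop is the Dict.modify grouping loop over the parsed pairs
theorem foldA_eq (xs : List String) (d : PySem.Dict String (List String)) :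
    xs.foldl stepA d
    = (xs.filterMap pySplitLV).foldl
        (fun d p => d.modify p.1 [] (fun l => l ++ [p.2])) d := by
  induction xs generalizing d with
  | nil => rfl
  | cons x xs ih =>
      simp only [List.foldl_cons, List.filterMap_cons]
      rcases h : pySplitLV x with _ | ⟨lane, value⟩
      · simp [h, ih, stepA]
      · simp [h, ih, stepA, stepA_eq_modify d lane value]

-- B's first pass is Set.ofList of the parsed lanes
theorem foldLanes_eq (xs : List String) (s : PySem.Set String) :
    xs.foldl stepLanes s
    = PySem.Set.update s ((xs.filterMap pySplitLV).map (fun p => p.1)) := by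
  rw [PySem.Set.update_map_eq_foldl_add]
  induction xs generalizing s with
  | nil => rfl
  | cons x xs ih =>
      simp only [List.foldl_cons, List.filterMap_cons]
      rcases h : pySplitLV x with _ | ⟨lane, value⟩
      · simp [h, ih, stepLanes]
      · simp [h, ih, stepLanes, PySem.Set.add_eq_ite]

-- B's rescan for lane k collects exactly the values filed under k
theorem foldGather_eq (k : String) (xs : List String) (vs : List String) :
    xs.foldl (stepGather k) vs
    = vs ++ ((xs.filterMap pySplitLV).filter (fun p => p.1 == k)).map (fun p => p.2) := by
  induction xs generalizing vs with
  | nil => simp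
  | cons x xs ih =>
      simp only [List.foldl_cons, List.filterMap_cons]
      rcases h : pySplitLV x with _ | ⟨lane, value⟩
      · simp [h, ih, stepGather]
      · by_cases hk : (lane == k) = true <;>
          simp [h, ih, stepGather, hk]

-- ===== VERDICT (by name: the statement is the Claim_ definition above) =====
theorem split_eye_height_by_lane_spec : Claim_equal_split_eye_height_by_lane := by
  intro xs _ _
  unfold Spec_split_eye_height_by_lane split_eye_height_by_lane split_eye_height_by_lane_alt
  rw [foldA_eq, foldLanes_eq]
  have hnd := PySem.Dict.nodup_keys_foldl_modify_key (List.filterMap pySplitLV xs)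
      (fun p : String × String => p.1) [] (fun _ p l => l ++ [p.2]) PySem.Dict.empty (by simp)
  have hv := PySem.Dict.values_eq_map_keys _ hnd ([] : List String)
  have hk := PySem.Dict.keys_foldl_modify_key (List.filterMap pySplitLV xs)
      (fun p : String × String => p.1) [] (fun _ p l => l ++ [p.2]) PySem.Dict.empty
  simp only [PySem.Dict.keys_empty] at hk
  simp only [hv, hk]
  refine List.map_congr_left (fun k _ => ?_)
  rw [foldGather_eq, PySem.Dict.getD_foldl_modify_append]
  simp
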